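-- pv_equiv track=rewrite | github.com/ronado2468-max/- | day26.py | sei_kazu
-- ===== SOURCE A (Python) =====
-- def sei_kazu(numbers):
--     result = [n for n in numbers if n > 0]
--
--     if not result:
--         return "NONE"
--
--     m = min(result)
--
--     if m >= 10:
--         return "HIGH"
--     else:
--         return "LOW"
-- ===== SOURCE B (Python) =====
-- def sei_kazu(numbers):
--     saw_positive = False
--     saw_small = False
--     for n in numbers:
--         if n > 0:
--             saw_positive = True
--             if n < 10:
--                 saw_small = True
--     if not saw_positive:
--         return "NONE"
--     return "LOW" if saw_small else "HIGH"
-- ===== Notes on version B (the rewrite author's own statement) =====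
-- stated objective: simpler
-- what changed: Replaces the filtered-list-plus-min computation with a single pass maintaining two booleans (any positive seen, any positive below 10 seen), reframing the minimum comparison as existence checks.
import Mathlib
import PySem

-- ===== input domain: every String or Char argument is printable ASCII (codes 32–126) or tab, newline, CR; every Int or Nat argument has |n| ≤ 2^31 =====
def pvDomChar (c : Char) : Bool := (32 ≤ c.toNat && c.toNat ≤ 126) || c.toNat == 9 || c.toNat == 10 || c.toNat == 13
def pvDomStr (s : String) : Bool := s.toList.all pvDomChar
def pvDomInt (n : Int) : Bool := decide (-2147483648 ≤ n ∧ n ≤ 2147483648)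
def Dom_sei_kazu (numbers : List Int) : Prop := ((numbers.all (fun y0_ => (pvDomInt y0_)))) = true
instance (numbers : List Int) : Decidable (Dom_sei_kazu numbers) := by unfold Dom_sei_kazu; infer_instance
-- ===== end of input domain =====

-- B replaces A's filtered-list-plus-min computation by one pass keeping two booleans (any positive, any positive < 10): simpler, O(1) extra space.


-- ===== PORT A =====
def sei_kazu (numbers : List Int) : String :=
  let result := numbers.filter (fun n => decide (n > 0))
  if result.isEmpty then "NONE"
  else
    match PySem.List.min? result (fun x => x) with
    | none => "NONE"   -- unreachable: result is nonempty here (Python min guarded by the emptiness test)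
    | some m => if m ≥ 10 then "HIGH" else "LOW"

-- ===== PORT B =====
def sei_kazu_alt (numbers : List Int) : String :=
  let st := numbers.foldl
    (fun (s : Bool × Bool) n =>
      if n > 0 then (true, s.2 || decide (n < 10)) else s)
    (false, false)
  if !st.1 then "NONE"
  else if st.2 then "LOW" else "HIGH"

-- ===== PRECONDITION & SPEC =====
def Spec_sei_kazu (numbers : List Int) (out : String) : Prop := out = sei_kazu_alt numbers
instance (numbers : List Int) (out : String) : Decidable (Spec_sei_kazu numbers out) := by unfold Spec_sei_kazu; infer_instance

-- ===== CLAIM (what is proved, stated in full; the proofs are below) =====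
def Claim_equal_sei_kazu : Prop := ∀ (numbers : List Int), Dom_sei_kazu numbers → Spec_sei_kazu numbers (sei_kazu numbers)

-- ===== LEMMAS AND PROOFS =====

-- B's fold computes the two existence checks.
theorem sei_kazu_fold_char (numbers : List Int) (a b : Bool) :
    numbers.foldl
      (fun (s : Bool × Bool) n =>
        if n > 0 then (true, s.2 || decide (n < 10)) else s)
      (a, b)
    = (a || numbers.any (fun n => decide (n > 0)),
       b || numbers.any (fun n => decide (0 < n ∧ n < 10))) := by
  induction numbers generalizing a b with
  | nil => simp
  | cons x t ih =>
    simp only [List.foldl_cons, List.any_cons]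
    by_cases hx : x > 0
    · by_cases hs : x < 10
      · have d2 : decide (x < 10) = true := by simp; omega
        have d3 : decide (0 < x ∧ x < 10) = true := by simp; omega
        simp [hx, ih, d2, d3]
      · have d2 : decide (x < 10) = false := by simp; omega
        have d3 : decide (0 < x ∧ x < 10) = false := by simp; omega
        simp [hx, ih, d2, d3]
    · have d3 : decide (0 < x ∧ x < 10) = false := by simp; omega
      simp [hx, ih, d3]

theorem sei_kazu_spec_aux (numbers : List Int) :
    sei_kazu numbers = sei_kazu_alt numbers := by
  unfold sei_kazu sei_kazu_alt
  rw [sei_kazu_fold_char]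
  simp only [Bool.false_or]
  by_cases hpos : numbers.any (fun n => decide (n > 0)) = true
  · -- some positive exists: filter nonempty
    have hne : numbers.filter (fun n => decide (n > 0)) ≠ [] := by
      simp only [ne_eq, List.filter_eq_nil_iff]
      simp only [List.any_eq_true] at hpos
      obtain ⟨x, hx, hxp⟩ := hpos
      intro h; exact absurd hxp (by simpa using h x hx)
    cases hmin : PySem.List.min? (numbers.filter (fun n => decide (n > 0))) (fun x => x) with
    | none =>
        exact absurd ((PySem.List.min?_eq_none_iff _ _).mp hmin) hne
    | some m =>
        have hmem := PySem.List.min?_mem hmin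
        have hmle := PySem.List.min?_isMin hmin
        have hm0 : m > 0 := by simpa using (List.mem_filter.mp hmem).2
        have hne' : (numbers.filter (fun n => decide (n > 0))).isEmpty = false := by
          simp [List.isEmpty_eq_false_iff, hne]
        rw [hne']
        simp only [Bool.false_eq_true, if_false]
        by_cases hsmall : numbers.any (fun n => decide (0 < n ∧ n < 10)) = true
        · -- a small positive exists, so m < 10
          simp only [List.any_eq_true] at hsmall
          obtain ⟨q, hq, hqp⟩ := hsmall
          simp only [decide_eq_true_eq] at hqp
          have hqf : q ∈ numbers.filter (fun n => decide (n > 0)) :=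
            List.mem_filter.mpr ⟨hq, by simpa using hqp.1⟩
          have : m ≤ q := hmle q hqf
          have hm10 : ¬ (m ≥ 10) := by omega
          simp only [ge_iff_le, hm10, if_false]
          simp [hpos]
          exact ⟨q, hq, hqp⟩
        · -- no small positive: every filtered element, in particular m, is ≥ 10
          have : ¬ (0 < m ∧ m < 10) := by
            intro h
            exact hsmall (List.any_eq_true.mpr ⟨m, (List.mem_filter.mp hmem).1, by simpa using h⟩)
          have hm10 : m ≥ 10 := by omega
          simp [hm10, hpos]
          intro x hx hx0
          by_contra hlt
          exact hsmall (List.any_eq_true.mpr ⟨x, hx, by simp; omega⟩)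
  · -- no positives: filter empty
    have hemp : numbers.filter (fun n => decide (n > 0)) = [] := by
      simp only [List.filter_eq_nil_iff]
      intro x hx
      simp only [List.any_eq_true, not_exists, not_and] at hpos
      exact hpos x hx
    simp [hemp, hpos]

-- ===== VERDICT (by name: the statement is the Claim_ definition above) =====
theorem sei_kazu_spec : Claim_equal_sei_kazu := by
  intro numbers _
  exact sei_kazu_spec_aux numbers
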